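-- pv_equiv track=rewrite | github.com/itswzyss/wzyss-cogs | lfg/lfg.py | _resolve_game
-- ===== SOURCE A (Python) =====
-- from typing import List, Optional, Tuple
--
-- def _normalize_game_name(name: str) -> str:
--     """Normalize for storage and matching: lowercase, strip."""
--     return name.strip().lower() if name else ""
--
-- def _resolve_game(games: List[str], input_name: str) -> Tuple[Optional[str], Optional[List[str]]]:
--     """
--     Resolve user input to a single canonical game name from the masterlist.
--     Returns (canonical_name, None) if exactly one match, (None, suggestions) if zero or multiple.
--     """
--     normalized_input = _normalize_game_name(input_name)
--     if not normalized_input: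
--         return (None, list(games)[:10] if games else None)
--
--     exact = []
--     starts = []
--     contains = []
--     for g in games:
--         n = _normalize_game_name(g)
--         if n == normalized_input:
--             exact.append(g)
--         elif n.startswith(normalized_input) or normalized_input.startswith(n):
--             starts.append(g)
--         elif normalized_input in n or n in normalized_input:
--             contains.append(g)
--
--     if exact:
--         return (exact[0], None)
--     candidates = (starts or contains) or []
--     if len(candidates) == 1:
--         return (candidates[0], None)
--     if candidates:
--         return (None, candidates[:10])
--     return (None, list(games)[:10] if games else None)
-- ===== SOURCE B (Python) =====
-- from typing import List, Optional, Tuple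
--
-- def _normalize_game_name(name: str) -> str:
--     return name.strip().lower() if name else ""
--
-- def _resolve_game(games: List[str], input_name: str) -> Tuple[Optional[str], Optional[List[str]]]:
--     q = _normalize_game_name(input_name)
--     if not q:
--         return (None, games[:10] if games else None)
--     norms = [(g, _normalize_game_name(g)) for g in games]
--     # pass 1: first exact match wins immediately
--     for g, n in norms:
--         if n == q:
--             return (g, None)
--     # pass 2: prefix relation (no exact matches exist at this point)
--     starts = [g for g, n in norms if n.startswith(q) or q.startswith(n)]
--     if starts:
--         return (starts[0], None) if len(starts) == 1 else (None, starts[:10])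
--     # pass 3: substring relation (no prefix matches exist at this point)
--     contains = [g for g, n in norms if q in n or n in q]
--     if len(contains) == 1:
--         return (contains[0], None)
--     if contains:
--         return (None, contains[:10])
--     return (None, games[:10] if games else None)
-- ===== Notes on version B (the rewrite author's own statement) =====
-- stated objective: alternative
-- what changed: Replaces A's single categorize-all pass that builds three buckets simultaneously with prioritized sequential phases: normalize once into a (game, normalized) list, early-return on the first exact match, then filter for prefix matches, and only if that is empty filter for substring matches.
import Mathlib
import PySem

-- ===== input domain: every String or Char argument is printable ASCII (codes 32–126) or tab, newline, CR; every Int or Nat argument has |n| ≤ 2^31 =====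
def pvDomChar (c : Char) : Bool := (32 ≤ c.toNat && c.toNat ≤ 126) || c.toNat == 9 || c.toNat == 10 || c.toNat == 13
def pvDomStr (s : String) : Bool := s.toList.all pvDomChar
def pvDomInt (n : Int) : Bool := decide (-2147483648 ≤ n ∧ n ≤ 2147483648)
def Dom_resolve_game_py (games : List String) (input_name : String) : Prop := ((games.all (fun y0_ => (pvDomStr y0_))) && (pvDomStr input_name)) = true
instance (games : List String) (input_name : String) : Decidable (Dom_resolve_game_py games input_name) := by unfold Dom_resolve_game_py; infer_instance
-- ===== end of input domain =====

-- B restructures A's single bucket-building pass into prioritized sequential phases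
-- (early-exit exact scan, then prefix filter, then substring filter); alternative, same cost.

-- shared helper: _normalize_game_name (identical in both Python files)
def pvNorm (name : String) : String :=
  if name ≠ "" then PySem.Str.lower (PySem.Str.strip name) else ""

-- ===== PORT A =====
def resolve_game_py (games : List String) (input_name : String) : Option String × Option (List String) :=
  let normalized_input := pvNorm input_name
  if normalized_input = "" then
    (none, if games ≠ [] then some (PySem.List.slice games none (some 10)) else none)
  else
    let st := games.foldl
      (fun (s : List String × List String × List String) g =>
        let n := pvNorm g
        if n = normalized_input then (s.1 ++ [g], s.2.1, s.2.2)
        else if PySem.Str.startswith n normalized_input || PySem.Str.startswith normalized_input n then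
          (s.1, s.2.1 ++ [g], s.2.2)
        else if PySem.Str.isIn normalized_input n || PySem.Str.isIn n normalized_input then
          (s.1, s.2.1, s.2.2 ++ [g])
        else s)
      ([], [], [])
    match st.1 with
    | e :: _ => (some e, none)
    | [] =>
      let candidates := if st.2.1 ≠ [] then st.2.1 else st.2.2
      if candidates.length = 1 then (candidates[0]?, none)
      else if candidates ≠ [] then (none, PySem.List.slice candidates none (some 10))
      else (none, if games ≠ [] then some (PySem.List.slice games none (some 10)) else none)

-- ===== PORT B =====
def resolve_game_py_alt (games : List String) (input_name : String) : Option String × Option (List String) :=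
  let q := pvNorm input_name
  if q = "" then
    (none, if games ≠ [] then some (games.take 10) else none)
  else
    let norms := games.map (fun g => (g, pvNorm g))
    match norms.find? (fun p => p.2 = q) with
    | some p => (some p.1, none)
    | none =>
      let starts := (norms.filter
        (fun p => PySem.Str.startswith p.2 q || PySem.Str.startswith q p.2)).map Prod.fst
      if starts ≠ [] then
        if starts.length = 1 then (starts[0]?, none) else (none, starts.take 10)
      else
        let contains := (norms.filter
          (fun p => PySem.Str.isIn q p.2 || PySem.Str.isIn p.2 q)).map Prod.fst
        if contains.length = 1 then (contains[0]?, none)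
        else if contains ≠ [] then (none, contains.take 10)
        else (none, if games ≠ [] then some (games.take 10) else none)

-- ===== PRECONDITION & SPEC =====
def Spec_resolve_game_py (games : List String) (input_name : String) (out : Option String × Option (List String)) : Prop := out = resolve_game_py_alt games input_name
instance (games : List String) (input_name : String) (out : Option String × Option (List String)) : Decidable (Spec_resolve_game_py games input_name out) := by unfold Spec_resolve_game_py; infer_instance

-- ===== CLAIM (what is proved, stated in full; the proofs are below) =====
def Claim_equal_resolve_game_py : Prop := ∀ (games : List String) (input_name : String), Dom_resolve_game_py games input_name → Spec_resolve_game_py games input_name (resolve_game_py games input_name)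

-- ===== LEMMAS AND PROOFS =====

-- Bool predicates classifying a game relative to the normalized input q
def pvIsExact (q g : String) : Bool := pvNorm g == q
def pvIsStarts (q g : String) : Bool :=
  PySem.Str.startswith (pvNorm g) q || PySem.Str.startswith q (pvNorm g)
def pvIsContains (q g : String) : Bool :=
  PySem.Str.isIn q (pvNorm g) || PySem.Str.isIn (pvNorm g) q

-- A's one-pass fold builds exactly the three filtered bucket lists
theorem pvFoldA (q : String) (games : List String) (e s c : List String) :
    games.foldl
      (fun (st : List String × List String × List String) g =>
        let n := pvNorm g
        if n = q then (st.1 ++ [g], st.2.1, st.2.2)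
        else if PySem.Str.startswith n q || PySem.Str.startswith q n then
          (st.1, st.2.1 ++ [g], st.2.2)
        else if PySem.Str.isIn q n || PySem.Str.isIn n q then
          (st.1, st.2.1, st.2.2 ++ [g])
        else st) (e, s, c)
    = (e ++ games.filter (fun g => pvIsExact q g),
       s ++ games.filter (fun g => !pvIsExact q g && pvIsStarts q g),
       c ++ games.filter (fun g => !pvIsExact q g && !pvIsStarts q g && pvIsContains q g)) := by
  induction games generalizing e s c with
  | nil => simp
  | cons g gs ih =>
    simp only [List.foldl_cons]
    split_ifs with h1 h2 h3
    · rw [ih]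
      simp [pvIsExact, pvIsStarts, pvIsContains, h1]
    · rw [ih]
      simp at h2
      rcases h2 with h2 | h2 <;>
        simp [pvIsExact, pvIsStarts, pvIsContains, h1, h2]
    · rw [ih]
      simp at h2 h3
      rcases h3 with h3 | h3 <;>
        simp [pvIsExact, pvIsStarts, pvIsContains, h1, h2.1, h2.2, h3]
    · rw [ih]
      simp at h2 h3
      simp [pvIsExact, pvIsStarts, pvIsContains, h1, h2.1, h2.2, h3.1, h3.2]

theorem pvSlice10 (xs : List String) :
    PySem.List.slice xs none (some 10) = xs.take 10 := by
  have := PySem.List.slice_to (xs := xs) (b := 10) (by norm_num)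
  simpa using this

-- ===== VERDICT (by name: the statement is the Claim_ definition above) =====
theorem resolve_game_py_spec : Claim_equal_resolve_game_py := by
  intro games input_name _
  show resolve_game_py games input_name = resolve_game_py_alt games input_name
  unfold resolve_game_py resolve_game_py_alt
  set q := pvNorm input_name with hq
  by_cases hq0 : q = ""
  · simp [hq0, pvSlice10]
  · simp only [hq0, if_false]
    rw [pvFoldA q games [] [] []]
    simp only [List.nil_append]
    -- B's find? over the (g, norm g) pairs is the head of A's exact bucket
    have hfind : (games.map (fun g => (g, pvNorm g))).find? (fun p => p.2 = q)
        = ((games.filter (fun g => pvIsExact q g)).head?).map (fun g => (g, pvNorm g)) := by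
      rw [List.find?_map, List.head?_filter]
      congr 1
    -- B's filtered pair lists, projected to first components
    have hmapS : ((games.map (fun g => (g, pvNorm g))).filter
          (fun p => PySem.Str.startswith p.2 q || PySem.Str.startswith q p.2)).map Prod.fst
        = games.filter (fun g => pvIsStarts q g) := by
      rw [List.filter_map, List.map_map]
      simp [pvIsStarts, Function.comp_def]
    have hmapC : ((games.map (fun g => (g, pvNorm g))).filter
          (fun p => PySem.Str.isIn q p.2 || PySem.Str.isIn p.2 q)).map Prod.fst
        = games.filter (fun g => pvIsContains q g) := by
      rw [List.filter_map, List.map_map]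
      simp [pvIsContains, Function.comp_def]
    rcases hE : games.filter (fun g => pvIsExact q g) with _ | ⟨e, rest⟩
    · -- no exact match: every game fails pvIsExact
      have hnoE : ∀ g ∈ games, ¬ pvIsExact q g = true := by
        intro g hg
        exact List.filter_eq_nil_iff.mp hE g hg
      have hSeq : games.filter (fun g => !pvIsExact q g && pvIsStarts q g)
          = games.filter (fun g => pvIsStarts q g) := by
        apply List.filter_congr
        intro g hg
        simp [Bool.eq_false_iff.mpr (hnoE g hg)]
      rw [hfind, hE]
      simp only [List.head?_nil, Option.map_none]
      rw [hmapS, hmapC, hSeq]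
      rcases hS : games.filter (fun g => pvIsStarts q g) with _ | ⟨s, srest⟩
      · -- no prefix match either: contains buckets coincide
        have hnoS : ∀ g ∈ games, ¬ pvIsStarts q g = true := by
          intro g hg
          exact List.filter_eq_nil_iff.mp hS g hg
        have hCeq : games.filter (fun g => !pvIsExact q g && !pvIsStarts q g && pvIsContains q g)
            = games.filter (fun g => pvIsContains q g) := by
          apply List.filter_congr
          intro g hg
          simp [Bool.eq_false_iff.mpr (hnoE g hg), Bool.eq_false_iff.mpr (hnoS g hg)]
        rw [hCeq]
        rcases hC : games.filter (fun g => pvIsContains q g) with _ | ⟨c, crest⟩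
        · simp [pvSlice10]
        · by_cases hlen : crest.length = 0
          · simp [hlen]
          · simp [hlen, pvSlice10]
      · by_cases hlen : srest.length = 0
        · simp [hlen]
        · simp [hlen, pvSlice10]
    · rw [hfind, hE]
      simp
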